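-- pv_equiv track=rewrite | github.com/pypi-data/pypi-mirror-392 | packages/chunkhound/chunkhound-4.1.0b1-py3-none-any.whl/chunkhound/utils/tree_formatter.py | build_file_hierarchy_tree
-- ===== SOURCE A (Python) =====
-- def build_file_hierarchy_tree(file_paths: list[str]) -> list[tuple[str, int, bool]]:
--     """Build hierarchical tree structure from flat file paths.
--
--     Groups files by directory and determines depth/is_last status for each entry.
--
--     Args:
--         file_paths: List of file paths (e.g., ['src/a.py', 'src/b.py', 'tests/c.py'])
--
--     Returns:
--         List of tuples: (display_name, depth, is_last)
--             - display_name: Directory or file name to display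
--             - depth: Tree depth level
--             - is_last: Whether this is the last item at its level
--
--     Examples:
--         >>> build_file_hierarchy_tree(['src/services/a.py', 'src/api/b.py'])
--         [
--             ('src/', 0, False),
--             ('├── services/', 1, False),
--             ('│   └── a.py', 2, True),
--             ('└── api/', 1, True),
--             ('    └── b.py', 2, True),
--         ]
--     """
--     if not file_paths:
--         return []
--
--     # Build directory tree structure
--     tree: dict[str, dict] = {}
--     for path in sorted(file_paths):
--         parts = path.split("/")
--         current = tree
--         for i, part in enumerate(parts):
--             if part not in current:
--                 current[part] = {}
--             current = current[part]
--
--     # Flatten tree to list with depth and is_last markers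
--     result: list[tuple[str, int, bool]] = []
--
--     def traverse(node: dict, depth: int, name: str = "", is_last_child: bool = False) -> None:
--         """Recursively traverse tree and build flat list with depth markers."""
--         if not node:
--             # Leaf node (file)
--             return
--
--         items = list(node.items())
--         for idx, (key, children) in enumerate(items):
--             is_last = idx == len(items) - 1
--             is_directory = bool(children)
--
--             # Format display name
--             if is_directory:
--                 display_name = f"{key}/"
--             else:
--                 display_name = key
--
--             # Add to result
--             result.append((display_name, depth, is_last))
--
--             # Recurse for children
--             if children:
--                 traverse(children, depth + 1, key, is_last)
--
--     # Start traversal from root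
--     traverse(tree, 0)
--
--     return result
-- ===== SOURCE B (Python) =====
-- def build_file_hierarchy_tree(file_paths: list[str]) -> list[tuple[str, int, bool]]:
--     """Build hierarchical tree structure from flat file paths.
--
--     Same nested-dict tree as the recursive version, but flattened by an
--     explicit-stack iterative pre-order DFS instead of recursion.
--     """
--     if not file_paths:
--         return []
--
--     tree: dict[str, dict] = {}
--     for path in sorted(file_paths):
--         current = tree
--         for part in path.split("/"):
--             if part not in current:
--                 current[part] = {}
--             current = current[part]
--
--     result: list[tuple[str, int, bool]] = []
--     items = list(tree.items())
--     stack = [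
--         (key, children, 0, i == len(items) - 1)
--         for i, (key, children) in enumerate(items)
--     ]
--     stack.reverse()
--     while stack:
--         key, children, depth, is_last = stack.pop()
--         is_directory = bool(children)
--         result.append((key + "/" if is_directory else key, depth, is_last))
--         if children:
--             kids = list(children.items())
--             for i in range(len(kids) - 1, -1, -1):
--                 k, c = kids[i]
--                 stack.append((k, c, depth + 1, i == len(kids) - 1))
--     return result
-- ===== Notes on version B (the rewrite author's own statement) =====
-- stated objective: alternative
-- what changed: The recursive tree traversal (nested closure mutating a result list) is replaced by an explicit-stack iterative pre-order DFS: sibling groups are pushed as (key, children, depth, is_last) entries and popped in order, so the flattening uses no recursion.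
import Mathlib
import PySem

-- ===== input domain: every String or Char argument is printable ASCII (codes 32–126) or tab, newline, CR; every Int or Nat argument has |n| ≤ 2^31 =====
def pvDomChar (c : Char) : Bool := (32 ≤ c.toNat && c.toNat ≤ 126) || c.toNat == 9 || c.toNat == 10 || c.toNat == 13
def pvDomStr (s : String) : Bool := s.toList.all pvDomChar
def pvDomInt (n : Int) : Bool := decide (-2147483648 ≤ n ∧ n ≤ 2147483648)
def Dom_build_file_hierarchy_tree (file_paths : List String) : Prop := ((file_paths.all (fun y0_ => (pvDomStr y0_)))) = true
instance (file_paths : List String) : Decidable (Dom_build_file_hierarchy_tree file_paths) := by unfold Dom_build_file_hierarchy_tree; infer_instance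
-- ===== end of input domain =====

-- B replaces A's recursive tree traversal by an explicit-stack iterative pre-order DFS
-- (same nested-dict tree, no recursion in the flattening); objective: alternative, not faster.

-- ===== PORT A =====
-- The nested dict[str, dict] tree: an insertion-ordered association list of
-- (key, child-subtree), encoded first-child/next-sibling (no nested inductive).
inductive Trie where
  | nil : Trie
  | node : String → Trie → Trie → Trie   -- key, children, remaining siblings
deriving DecidableEq

-- inner loop "for part in parts: if part not in current: current[part] = {}; current = current[part]"
-- as a functional update along the path (new keys are appended at the end, as dict insertion does)
def trieInsert (t : Trie) (parts : List String) : Trie :=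
  match parts, t with
  | [], t => t
  | p :: ps, .nil => .node p (trieInsert .nil ps) .nil
  | p :: ps, .node k c s =>
      if k = p then .node k (trieInsert c ps) s
      else .node k c (trieInsert s (p :: ps))
termination_by (parts.length, sizeOf t)

-- path.split("/"): sep "/" is nonempty, so PySem.Str.split? is always `some`
def pySplit (s : String) : List String := (PySem.Str.split? s "/").getD []

-- "tree = {}; for path in sorted(file_paths): …"  (identical in A and in B)
def buildTree (paths : List String) : Trie :=
  paths.foldl (fun t p => trieInsert t (pySplit p)) .nil

-- A's recursive traverse: per sibling, is_last = (no further siblings), recurse on children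
def traverseA : Trie → Int → List (String × Int × Bool)
  | .nil, _ => []
  | .node k c s, depth =>
      let is_last : Bool := decide (s = Trie.nil)
      let is_directory : Bool := decide (c ≠ Trie.nil)
      let display := if is_directory then k ++ "/" else k
      (display, depth, is_last) ::
        ((if c ≠ Trie.nil then traverseA c (depth + 1) else []) ++ traverseA s depth)

def build_file_hierarchy_tree (file_paths : List String) : List (String × Int × Bool) :=
  if file_paths = [] then []
  else traverseA (buildTree (PySem.List.sorted file_paths (fun x => x) false)) 0

-- ===== PORT B =====
-- node weight, only used for the termination of the stack loop below
def trieWeight : Trie → Nat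
  | .nil => 0
  | .node _ c s => 1 + trieWeight c + trieWeight s

def stackWeight (st : List (String × Trie × Int × Bool)) : Nat :=
  (st.map (fun e => 1 + trieWeight e.2.1)).sum

-- the sibling group of a node as stack entries "(key, children, depth, i == len-1)".
-- Python keeps its stack top at the END of a list; we keep the top at the HEAD, so
-- Python's "build then reverse()" (and its reversed-index child pushes) is exactly
-- this forward-order list prepended to the stack.
def toEntries : Trie → Int → List (String × Trie × Int × Bool)
  | .nil, _ => []
  | .node k c s, d => (k, c, d, decide (s = Trie.nil)) :: toEntries s d

theorem stackWeight_toEntries (t : Trie) (d : Int) :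
    stackWeight (toEntries t d) = trieWeight t := by
  induction t generalizing d with
  | nil => simp [toEntries, stackWeight, trieWeight]
  | node k c s ihc ihs =>
      have h := ihs d
      rw [toEntries, trieWeight, ← h]
      simp only [stackWeight, List.map_cons, List.sum_cons]

theorem stackWeight_append (a b : List (String × Trie × Int × Bool)) :
    stackWeight (a ++ b) = stackWeight a + stackWeight b := by
  simp [stackWeight]

-- B's while-loop: pop, emit, push children
def stackRun (st : List (String × Trie × Int × Bool)) (acc : List (String × Int × Bool)) :
    List (String × Int × Bool) :=
  match st with
  | [] => acc
  | (k, c, d, il) :: rest =>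
      let is_directory : Bool := decide (c ≠ Trie.nil)
      let acc' := acc ++ [((if is_directory then k ++ "/" else k), d, il)]
      if c ≠ Trie.nil then stackRun (toEntries c (d + 1) ++ rest) acc'
      else stackRun rest acc'
termination_by stackWeight st
decreasing_by
  · rw [stackWeight_append, stackWeight_toEntries]
    simp only [stackWeight, List.map_cons, List.sum_cons]
    omega
  · simp only [stackWeight, List.map_cons, List.sum_cons]
    omega

def build_file_hierarchy_tree_alt (file_paths : List String) : List (String × Int × Bool) :=
  if file_paths = [] then []
  else stackRun (toEntries (buildTree (PySem.List.sorted file_paths (fun x => x) false)) 0) []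

-- ===== PRECONDITION & SPEC =====
def Spec_build_file_hierarchy_tree (file_paths : List String) (out : List (String × Int × Bool)) : Prop := out = build_file_hierarchy_tree_alt file_paths
instance (file_paths : List String) (out : List (String × Int × Bool)) : Decidable (Spec_build_file_hierarchy_tree file_paths out) := by unfold Spec_build_file_hierarchy_tree; infer_instance

-- ===== CLAIM (what is proved, stated in full; the proofs are below) =====
def Claim_equal_build_file_hierarchy_tree : Prop := ∀ (file_paths : List String), Dom_build_file_hierarchy_tree file_paths → Spec_build_file_hierarchy_tree file_paths (build_file_hierarchy_tree file_paths)

-- ===== LEMMAS AND PROOFS =====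
theorem stackRun_cons (k : String) (c : Trie) (d : Int) (il : Bool)
    (rest : List (String × Trie × Int × Bool)) (acc : List (String × Int × Bool)) :
    stackRun ((k, c, d, il) :: rest) acc =
      if c = Trie.nil then stackRun rest (acc ++ [(k, d, il)])
      else stackRun (toEntries c (d + 1) ++ rest) (acc ++ [(k ++ "/", d, il)]) := by
  rw [stackRun]
  by_cases h : c = Trie.nil <;> simp [h]

-- the explicit stack replays the recursion: running the stack on a sibling group,
-- then the remainder, appends exactly that group's recursive pre-order output
theorem stackRun_toEntries (t : Trie) (d : Int)
    (rest : List (String × Trie × Int × Bool)) (acc : List (String × Int × Bool)) :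
    stackRun (toEntries t d ++ rest) acc = stackRun rest (acc ++ traverseA t d) := by
  induction t generalizing d rest acc with
  | nil => simp [toEntries, traverseA]
  | node k c s ihc ihs =>
      rw [toEntries, List.cons_append, stackRun_cons]
      by_cases hc : c = Trie.nil
      · subst hc
        rw [if_pos rfl, ihs]
        simp [traverseA]
      · rw [if_neg hc, ihc, ihs]
        simp [traverseA, hc]

-- ===== VERDICT (by name: the statement is the Claim_ definition above) =====
theorem build_file_hierarchy_tree_spec : Claim_equal_build_file_hierarchy_tree := by
  intro file_paths _
  unfold Spec_build_file_hierarchy_tree build_file_hierarchy_tree build_file_hierarchy_tree_alt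
  by_cases h : file_paths = []
  · simp [h]
  · rw [if_neg h, if_neg h]
    have := stackRun_toEntries (buildTree (PySem.List.sorted file_paths (fun x => x) false)) 0 [] []
    simpa [stackRun] using this.symm
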